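-- pv_equiv track=rewrite | github.com/lishuwnc/Kickstart-Framework-Python | archive/EE2017.py | solveEEB2017
-- ===== SOURCE A (Python) =====
-- def solveEEB2017(n):
--     q = 2
--     p = 64
--     while p > 2:
--         lo = 2
--         hi = n // p
--         while lo <= hi:
--             mid = (lo + hi) // 2
--             t = (mid ** p - 1) - (mid - 1) * n
--             if t == 0:
--                 return mid
--             if t > 0:
--                 hi = mid - 1
--             else:
--                 lo = mid + 1
--         p -= 1
--     return n - 1
-- ===== SOURCE B (Python) =====
-- def solveEEB2017(n):
--     # Incremental scan of bases: repunit value (m**p-1)//(m-1) is strictly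
--     # increasing in m, so walk m upward until it passes n instead of binary search.
--     for p in range(64, 2, -1):
--         m = 2
--         while True:
--             v = (m ** p - 1) // (m - 1)
--             if v == n:
--                 return m
--             if v > n:
--                 break
--             m += 1
--     return n - 1
-- ===== Notes on version B (the rewrite author's own statement) =====
-- stated objective: alternative
-- what changed: The inner binary search over the base is replaced by an incremental upward scan that walks the strictly increasing repunit value (m**p-1)//(m-1) until it reaches or passes n, keeping the same descending digit-count loop and n-1 fallback.
import Mathlib
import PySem

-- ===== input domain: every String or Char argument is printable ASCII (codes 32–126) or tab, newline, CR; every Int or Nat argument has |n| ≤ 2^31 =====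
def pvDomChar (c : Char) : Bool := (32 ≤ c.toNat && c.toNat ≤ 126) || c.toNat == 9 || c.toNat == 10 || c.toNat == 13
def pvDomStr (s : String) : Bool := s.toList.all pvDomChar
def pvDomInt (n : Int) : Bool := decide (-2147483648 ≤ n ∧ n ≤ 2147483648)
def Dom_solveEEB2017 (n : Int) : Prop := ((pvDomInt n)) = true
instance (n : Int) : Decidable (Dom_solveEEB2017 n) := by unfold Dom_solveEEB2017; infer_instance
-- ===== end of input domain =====

-- B replaces A's binary search over the base by an incremental upward scan of the
-- strictly increasing repunit value (objective: alternative, simpler loop; not faster).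

-- ===== PORT A =====
-- inner `while lo <= hi` binary search of A
def pvBSearchA (n : Int) (p : Nat) (lo hi : Int) : Option Int :=
  if h : lo ≤ hi then
    let mid := PySem.Int.floordiv (lo + hi) 2
    let t := mid ^ p - 1 - (mid - 1) * n
    if t = 0 then some mid
    else if t > 0 then pvBSearchA n p lo (mid - 1)
    else pvBSearchA n p (mid + 1) hi
  else none
termination_by (hi + 1 - lo).toNat
decreasing_by
  · have := PySem.Int.floordiv_two_mid_bounds h
    simp only [mid] at *
    omega
  · have := PySem.Int.floordiv_two_mid_bounds h
    simp only [mid] at *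
    omega

-- outer `while p > 2` loop of A (counter k is the current value of p)
def pvLoopA (n : Int) : Nat → Int
  | 0 => n - 1
  | 1 => n - 1
  | 2 => n - 1
  | k + 3 =>
    match pvBSearchA n (k + 3) 2 (PySem.Int.floordiv n (k + 3)) with
    | some m => m
    | none => pvLoopA n (k + 2)

def solveEEB2017 (n : Int) : Int := pvLoopA n 64

-- ===== PORT B =====
-- inner `while True` scan of B; fuel is only a totality guard (the scan provably
-- stops before exhausting it whenever it matters)
def pvScanB (n : Int) (p : Nat) (m : Int) : Nat → Option Int
  | 0 => none
  | fuel + 1 =>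
    let v := PySem.Int.floordiv (m ^ p - 1) (m - 1)
    if v = n then some m
    else if v > n then none
    else pvScanB n p (m + 1) fuel

-- `for p in range(64, 2, -1)` loop of B
def pvLoopB (n : Int) : Nat → Int
  | 0 => n - 1
  | 1 => n - 1
  | 2 => n - 1
  | k + 3 =>
    match pvScanB n (k + 3) 2 ((n - 2).toNat + 1) with
    | some m => m
    | none => pvLoopB n (k + 2)

def solveEEB2017_alt (n : Int) : Int := pvLoopB n 64

-- ===== PRECONDITION & SPEC =====
def Spec_solveEEB2017 (n : Int) (out : Int) : Prop := out = solveEEB2017_alt n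
instance (n : Int) (out : Int) : Decidable (Spec_solveEEB2017 n out) := by unfold Spec_solveEEB2017; infer_instance

-- ===== CLAIM (what is proved, stated in full; the proofs are below) =====
def Claim_equal_solveEEB2017 : Prop := ∀ (n : Int), Dom_solveEEB2017 n → Spec_solveEEB2017 n (solveEEB2017 n)

-- ===== LEMMAS AND PROOFS =====

-- the p-digit repunit with base m
def pvRep (p : Nat) (m : Int) : Int := ∑ i ∈ Finset.range p, m ^ i

lemma pvRep_mul (p : Nat) (m : Int) : (m - 1) * pvRep p m = m ^ p - 1 := by
  unfold pvRep
  linarith [geom_sum_mul m p]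

lemma pvRep_strictMono {p : Nat} (hp : 2 ≤ p) {a b : Int} (ha : 0 ≤ a) (hab : a < b) :
    pvRep p a < pvRep p b := by
  unfold pvRep
  refine Finset.sum_lt_sum (fun i _ => pow_le_pow_left₀ ha hab.le i)
    ⟨1, Finset.mem_range.mpr (by omega), by simpa using hab⟩

lemma pvRep_inj {p : Nat} (hp : 2 ≤ p) {a b : Int} (ha : 0 ≤ a) (hb : 0 ≤ b)
    (h : pvRep p a = pvRep p b) : a = b := by
  rcases lt_trichotomy a b with h1 | h1 | h1
  · exact absurd h (ne_of_lt (pvRep_strictMono hp ha h1))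
  · exact h1
  · exact absurd h.symm (ne_of_lt (pvRep_strictMono hp hb h1))

-- the test value t of A, in terms of pvRep
lemma pvT_eq (p : Nat) (n m : Int) :
    m ^ p - 1 - (m - 1) * n = (m - 1) * (pvRep p m - n) := by
  have h := pvRep_mul p m
  nlinarith [pvRep_mul p m]

-- any base-m p-digit repunit is at least p*m  (so the root lies below n // p)
lemma pvRep_ge_mul {p : Nat} (hp : 3 ≤ p) {m : Int} (hm : 2 ≤ m) :
    (p : Int) * m ≤ pvRep p m := by
  induction p with
  | zero => omega
  | succ q ih =>
    rcases Nat.lt_or_ge q 3 with hq | hq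
    · interval_cases q
      · omega
      · omega
      · -- p = 3
        unfold pvRep
        simp [Finset.sum_range_succ]
        nlinarith
    · have h1 := ih (by omega)
      have h2 : m ≤ m ^ q := by
        calc m = m ^ 1 := (pow_one m).symm
        _ ≤ m ^ q := pow_le_pow_right₀ (by omega) (by omega)
      have h3 : pvRep (q + 1) m = pvRep q m + m ^ q := by
        unfold pvRep; rw [Finset.sum_range_succ]
      push_cast
      rw [h3]
      push_cast at h1
      nlinarith

lemma pvRep_ge_self {p : Nat} (hp : 3 ≤ p) {m : Int} (hm : 2 ≤ m) : m ≤ pvRep p m := by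
  have h := pvRep_ge_mul hp hm
  have hp' : (3 : Int) ≤ (p : Int) := by exact_mod_cast hp
  nlinarith

-- one unfolded step of the binary search, with the midpoint named
lemma pvBSearchA_step (n : Int) (p : Nat) (lo hi : Int) (h : lo ≤ hi) :
    pvBSearchA n p lo hi =
      (let mid := PySem.Int.floordiv (lo + hi) 2
       if mid ^ p - 1 - (mid - 1) * n = 0 then some mid
       else if mid ^ p - 1 - (mid - 1) * n > 0 then pvBSearchA n p lo (mid - 1)
       else pvBSearchA n p (mid + 1) hi) := by
  rw [pvBSearchA]
  simp [h]

-- soundness of A's binary search: a returned value is a repunit base ≥ 2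
lemma pvBSearchA_sound (n : Int) (p : Nat) (hp : 2 ≤ p) :
    ∀ (N : Nat) (lo hi m' : Int), (hi + 1 - lo).toNat ≤ N → 2 ≤ lo →
      pvBSearchA n p lo hi = some m' → 2 ≤ m' ∧ pvRep p m' = n := by
  intro N
  induction N with
  | zero =>
    intro lo hi m' hN h2 hsome
    have h : ¬ lo ≤ hi := by omega
    rw [pvBSearchA] at hsome
    simp [h] at hsome
  | succ N ih =>
    intro lo hi m' hN h2 hsome
    by_cases h : lo ≤ hi
    · have hb := PySem.Int.floordiv_two_mid_bounds h
      rw [pvBSearchA_step n p lo hi h] at hsome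
      set mid := PySem.Int.floordiv (lo + hi) 2 with hmid
      simp only at hsome
      split_ifs at hsome with h0 h1
      · -- t = 0
        have h2m : 2 ≤ mid := by omega
        have ht' : (mid - 1) * (pvRep p mid - n) = 0 := by rw [← pvT_eq]; exact h0
        have hrep : pvRep p mid = n := by
          rcases mul_eq_zero.mp ht' with hc | hc
          · omega
          · omega
        have hmm : m' = mid := by
          simpa using hsome.symm
        subst hmm
        exact ⟨h2m, hrep⟩
      · exact ih lo (mid - 1) m' (by omega) h2 hsome
      · exact ih (mid + 1) hi m' (by omega) (by omega) hsome
    · rw [pvBSearchA] at hsome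
      simp [h] at hsome

-- completeness of A's binary search: it finds the (unique) root in range
lemma pvBSearchA_finds (n : Int) (p : Nat) (hp : 3 ≤ p) (m0 : Int) (hm0 : 2 ≤ m0)
    (hroot : pvRep p m0 = n) :
    ∀ (N : Nat) (lo hi : Int), (hi + 1 - lo).toNat ≤ N → 2 ≤ lo → lo ≤ m0 → m0 ≤ hi →
      pvBSearchA n p lo hi = some m0 := by
  intro N
  induction N with
  | zero => intro lo hi hN h2 hlo hhi; omega
  | succ N ih =>
    intro lo hi hN h2 hlo hhi
    have h : lo ≤ hi := by omega
    have hb := PySem.Int.floordiv_two_mid_bounds h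
    rw [pvBSearchA_step n p lo hi h]
    set mid := PySem.Int.floordiv (lo + hi) 2 with hmid
    simp only
    have h2m : 2 ≤ mid := by omega
    split_ifs with h0 h1
    · -- t = 0 at mid: mid must be the unique root m0
      have ht' : (mid - 1) * (pvRep p mid - n) = 0 := by rw [← pvT_eq]; exact h0
      have hrep : pvRep p mid = n := by
        rcases mul_eq_zero.mp ht' with hc | hc
        · omega
        · omega
      have : mid = m0 := pvRep_inj (p := p) (by omega) (by omega) (by omega)
        (hrep.trans hroot.symm)
      rw [this]
    · -- t > 0: rep mid > n, so m0 < mid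
      have ht' : 0 < (mid - 1) * (pvRep p mid - n) := by rw [← pvT_eq]; exact h1
      have hgt : n < pvRep p mid := by nlinarith
      have hmlt : m0 < mid := by
        by_contra hcon
        push_neg at hcon
        rcases eq_or_lt_of_le hcon with he | hl
        · rw [he] at hgt; omega
        · have := pvRep_strictMono (p := p) (by omega) (by omega) hl
          omega
      exact ih lo (mid - 1) (by omega) h2 hlo (by omega)
    · -- t < 0: rep mid < n, so mid < m0
      have ht' : (mid - 1) * (pvRep p mid - n) < 0 := by
        rw [← pvT_eq]; omega
      have hlt : pvRep p mid < n := by nlinarith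
      have hmgt : mid < m0 := by
        by_contra hcon
        push_neg at hcon
        rcases eq_or_lt_of_le hcon with he | hl
        · rw [← he] at hlt; omega
        · have := pvRep_strictMono (p := p) (by omega) (by omega : (0:Int) ≤ m0) hl
          omega
      exact ih (mid + 1) hi (by omega) (by omega) (by omega) hhi

-- the floor division in B's scan is exact
lemma pvScan_v_eq {m : Int} (hm : 2 ≤ m) (p : Nat) :
    PySem.Int.floordiv (m ^ p - 1) (m - 1) = pvRep p m := by
  rw [← pvRep_mul p m]
  rw [PySem.Int.floordiv_eq_ediv_of_pos (by omega)]
  exact Int.mul_ediv_cancel_left _ (by omega)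

-- soundness of B's scan
lemma pvScanB_sound (n : Int) (p : Nat) :
    ∀ (fuel : Nat) (m m' : Int), 2 ≤ m → pvScanB n p m fuel = some m' →
      2 ≤ m' ∧ pvRep p m' = n := by
  intro fuel
  induction fuel with
  | zero => intro m m' _ hs; simp [pvScanB] at hs
  | succ f ih =>
    intro m m' hm hs
    rw [pvScanB] at hs
    simp only [pvScan_v_eq hm] at hs
    split_ifs at hs with hv hv2
    · have hmm : m' = m := by simpa using hs.symm
      subst hmm
      exact ⟨hm, hv⟩
    · exact ih (m + 1) m' (by omega) hs

-- completeness of B's scan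
lemma pvScanB_finds (n : Int) (p : Nat) (hp : 3 ≤ p) (m0 : Int) (hm0 : 2 ≤ m0)
    (hroot : pvRep p m0 = n) :
    ∀ (fuel : Nat) (m : Int), 2 ≤ m → m ≤ m0 → (m0 - m).toNat < fuel →
      pvScanB n p m fuel = some m0 := by
  intro fuel
  induction fuel with
  | zero => intro m _ _ hf; omega
  | succ f ih =>
    intro m hm hmle hf
    rw [pvScanB]
    simp only [pvScan_v_eq hm]
    by_cases hv : pvRep p m = n
    · have : m = m0 := pvRep_inj (p := p) (by omega) (by omega) (by omega)
        (hv.trans hroot.symm)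
      rw [if_pos hv, this]
    · have hmlt : m < m0 := by
        rcases eq_or_lt_of_le hmle with he | hl
        · exact absurd (he ▸ hroot) hv
        · exact hl
      have hlt : pvRep p m < n := by
        have := pvRep_strictMono (p := p) (by omega) (by omega) hmlt
        omega
      rw [if_neg hv, if_neg (by omega)]
      exact ih (m + 1) (by omega) (by omega) (by omega)

-- per-p equality of the two inner loops
lemma pvInner_eq (n : Int) (p : Nat) (hp : 3 ≤ p) :
    pvBSearchA n p 2 (PySem.Int.floordiv n p) = pvScanB n p 2 ((n - 2).toNat + 1) := by
  by_cases hex : ∃ m0, 2 ≤ m0 ∧ pvRep p m0 = n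
  · obtain ⟨m0, hm0, hroot⟩ := hex
    have hp' : (3 : Int) ≤ (p : Int) := by exact_mod_cast hp
    have hpm : (p : Int) * m0 ≤ n := hroot ▸ pvRep_ge_mul hp hm0
    have hmn : m0 ≤ n := le_trans (pvRep_ge_self hp hm0) (le_of_eq hroot)
    have hhi : m0 ≤ PySem.Int.floordiv n p := by
      rw [PySem.Int.le_floordiv_iff_mul_le (by omega)]
      nlinarith
    rw [pvBSearchA_finds n p hp m0 hm0 hroot ((PySem.Int.floordiv n p + 1 - 2).toNat)
      2 _ (le_refl _) (by omega) hm0 hhi]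
    rw [pvScanB_finds n p hp m0 hm0 hroot _ 2 (by omega) hm0 (by omega)]
  · push_neg at hex
    cases hA : pvBSearchA n p 2 (PySem.Int.floordiv n p) with
    | some m' =>
      obtain ⟨h1, h2⟩ := pvBSearchA_sound n p (by omega)
        ((PySem.Int.floordiv n p + 1 - 2).toNat) 2 _ m' (le_refl _) (by omega) hA
      exact absurd h2 (hex m' h1)
    | none =>
      cases hB : pvScanB n p 2 ((n - 2).toNat + 1) with
      | some m' =>
        obtain ⟨h1, h2⟩ := pvScanB_sound n p _ 2 m' (by omega) hB
        exact absurd h2 (hex m' h1)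
      | none => rfl

-- the two outer loops agree at every counter value
lemma pvLoop_eq (n : Int) : ∀ k, pvLoopA n k = pvLoopB n k
  | 0 => rfl
  | 1 => rfl
  | 2 => rfl
  | k + 3 => by
    rw [pvLoopA, pvLoopB, ← pvInner_eq n (k + 3) (by omega)]
    push_cast
    cases h : pvBSearchA n (k + 3) 2 (PySem.Int.floordiv n ((k : Int) + 3)) with
    | some m => simp [h]
    | none => simp [h, pvLoop_eq n (k + 2)]

-- ===== VERDICT (by name: the statement is the Claim_ definition above) =====
theorem solveEEB2017_spec : Claim_equal_solveEEB2017 := by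
  intro n _
  unfold Spec_solveEEB2017 solveEEB2017 solveEEB2017_alt
  exact pvLoop_eq n 64
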